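-- pv_equiv track=rewrite | github.com/Secret-Ambush/Timetable-generator | app.py | map_days_hours_to_time_slots
-- ===== SOURCE A (Python) =====
-- def map_days_hours_to_time_slots(day_hour_str):
--     days = {'M': 'Monday', 'T': 'Tuesday', 'W': 'Wednesday', 'Th': 'Thursday', 'F': 'Friday', 'S': 'Saturday', 'Su': 'Sunday'}
--     day_hour_list = []
--     day_str = ''
--     hour_str = ''
--     for char in day_hour_str:
--         if char.isalpha():
--             if day_str and hour_str:
--                 day = days.get(day_str, "Unknown Day")
--                 for hour in hour_str:
--                     slot = time_slots[day][int(hour)-1]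
--                     day_hour_list.append((day, slot))
--                 day_str = ''
--                 hour_str = ''
--             day_str += char
--         elif char.isdigit():
--             hour_str += char
--     if day_str and hour_str:
--         day = days.get(day_str, "Unknown Day")
--         for hour in hour_str:
--             slot = time_slots[day][int(hour)-1]
--             day_hour_list.append((day, slot))
--     return day_hour_list
--
-- time_slots = {
--     'Monday': ['7:30-8:20', '8:25-9:15', '9:20-10:10', '10:15-11:05', '11:10-12:00', '12:05-12:55', '1:00-1:50', '1:55-2:45', '2:50-3:40'],
--     'Tuesday': ['7:30-8:20', '8:25-9:15', '9:20-10:10', '10:15-11:05', '11:10-12:00', '12:05-12:55', '1:00-1:50', '1:55-2:45', '2:50-3:40'],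
--     'Wednesday': ['7:30-8:20', '8:25-9:15', '9:20-10:10', '10:15-11:05', '11:10-12:00', '12:05-12:55', '1:00-1:50', '1:55-2:45', '2:50-3:40'],
--     'Thursday': ['7:30-8:20', '8:25-9:15', '9:20-10:10', '10:15-11:05', '11:10-12:00', '12:05-12:55', '1:00-1:50', '1:55-2:45', '2:50-3:40'],
--     'Friday': ['7:30-8:20', '8:25-9:15', '9:20-10:10', '10:15-11:05', '11:10-12:00'],
-- }
-- ===== SOURCE B (Python) =====
-- time_slots = {
--     'Monday': ['7:30-8:20', '8:25-9:15', '9:20-10:10', '10:15-11:05', '11:10-12:00', '12:05-12:55', '1:00-1:50', '1:55-2:45', '2:50-3:40'],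
--     'Tuesday': ['7:30-8:20', '8:25-9:15', '9:20-10:10', '10:15-11:05', '11:10-12:00', '12:05-12:55', '1:00-1:50', '1:55-2:45', '2:50-3:40'],
--     'Wednesday': ['7:30-8:20', '8:25-9:15', '9:20-10:10', '10:15-11:05', '11:10-12:00', '12:05-12:55', '1:00-1:50', '1:55-2:45', '2:50-3:40'],
--     'Thursday': ['7:30-8:20', '8:25-9:15', '9:20-10:10', '10:15-11:05', '11:10-12:00', '12:05-12:55', '1:00-1:50', '1:55-2:45', '2:50-3:40'],
--     'Friday': ['7:30-8:20', '8:25-9:15', '9:20-10:10', '10:15-11:05', '11:10-12:00'],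
-- }
--
--
-- def map_days_hours_to_time_slots(day_hour_str):
--     days = {'M': 'Monday', 'T': 'Tuesday', 'W': 'Wednesday', 'Th': 'Thursday', 'F': 'Friday', 'S': 'Saturday', 'Su': 'Sunday'}
--     # phase 1: cut the string into maximal runs of letters / digits (other chars separate runs)
--     runs = []
--     i, n = 0, len(day_hour_str)
--     while i < n:
--         c = day_hour_str[i]
--         if c.isalpha():
--             j = i + 1
--             while j < n and day_hour_str[j].isalpha():
--                 j += 1
--             runs.append(day_hour_str[i:j])
--             i = j
--         elif c.isdigit():
--             j = i + 1
--             while j < n and day_hour_str[j].isdigit():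
--                 j += 1
--             runs.append(day_hour_str[i:j])
--             i = j
--         else:
--             i += 1
--     # phase 2: group the runs into (day code, hour digits) records
--     records = []
--     day_buf = ''
--     hour_buf = ''
--     for run in runs:
--         if run[0].isdigit():
--             hour_buf += run
--         elif day_buf and hour_buf:
--             records.append((day_buf, hour_buf))
--             day_buf, hour_buf = run, ''
--         else:
--             day_buf += run
--     if day_buf and hour_buf:
--         records.append((day_buf, hour_buf))
--     # phase 3: expand each record into its (day name, slot) pairs
--     out = []
--     for d, hs in records:
--         day = days.get(d, "Unknown Day")
--         for h in hs:
--             out.append((day, time_slots[day][int(h) - 1]))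
--     return out
-- ===== Notes on version B (the rewrite author's own statement) =====
-- stated objective: alternative
-- what changed: A is a single char-by-char state machine that flushes pairs mid-scan; B is three separate phases: cut the string into maximal letter/digit runs, group the runs into (day code, hour digits) records, then expand the records into pairs. Pre_ excludes inputs on which A raises (KeyError for a day code outside M/T/W/Th/F, IndexError for a Friday hour above 5), and strings where a digit precedes the first letter: there the grouping of the following letter run is an unspecified corner: A pairs the hours with only the first letter of the run while B pairs them with the whole run; …
-- outside the precondition, e.g. on map_days_hours_to_time_slots('1Th'): A returns [('Tuesday', '7:30-8:20')], B returns [('Thursday', '7:30-8:20')]; on map_days_hours_to_time_slots('1MM'): A returns [('Monday', '7:30-8:20')], B raises KeyError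
import Mathlib
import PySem

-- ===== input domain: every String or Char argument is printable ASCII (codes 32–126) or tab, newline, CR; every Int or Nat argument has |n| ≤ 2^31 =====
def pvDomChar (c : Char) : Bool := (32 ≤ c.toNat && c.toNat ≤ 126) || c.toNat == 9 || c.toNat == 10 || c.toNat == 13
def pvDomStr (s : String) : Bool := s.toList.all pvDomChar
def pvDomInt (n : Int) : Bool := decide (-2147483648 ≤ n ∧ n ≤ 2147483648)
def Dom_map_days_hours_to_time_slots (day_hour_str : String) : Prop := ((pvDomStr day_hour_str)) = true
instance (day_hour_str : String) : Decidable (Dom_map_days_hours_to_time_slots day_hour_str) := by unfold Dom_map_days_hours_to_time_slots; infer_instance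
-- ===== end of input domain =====

-- B re-decomposes A's single char-level state machine into three phases (tokenize into runs,
-- group runs into records, expand records); same return value on Pre_, no speed claim.

-- ===== PORT A =====
-- shared context of both Pythons: the `days` dict lookup with default "Unknown Day"
def dayName (d : List Char) : String :=
  if d = ['M'] then "Monday" else if d = ['T'] then "Tuesday"
  else if d = ['W'] then "Wednesday" else if d = ['T','h'] then "Thursday"
  else if d = ['F'] then "Friday" else if d = ['S'] then "Saturday"
  else if d = ['S','u'] then "Sunday" else "Unknown Day"

def slots9 : List String :=
  ["7:30-8:20", "8:25-9:15", "9:20-10:10", "10:15-11:05", "11:10-12:00",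
   "12:05-12:55", "1:00-1:50", "1:55-2:45", "2:50-3:40"]

-- time_slots[day]; [] stands for the KeyError case, which Pre_ excludes
def timeSlots (day : String) : List String :=
  if day = "Monday" then slots9 else if day = "Tuesday" then slots9
  else if day = "Wednesday" then slots9 else if day = "Thursday" then slots9
  else if day = "Friday" then
    ["7:30-8:20", "8:25-9:15", "9:20-10:10", "10:15-11:05", "11:10-12:00"]
  else []

-- the shared emission loop: for hour in hour_str: append (day, time_slots[day][int(hour)-1])
-- (.getD "" stands for the IndexError case, which Pre_ excludes)
def flushRec (d h : List Char) : List (String × String) :=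
  let day := dayName d
  h.map (fun c => (day, (PySem.List.pyGet? (timeSlots day) ((c.toNat : Int) - 48 - 1)).getD ""))

-- A's per-character step on state (day_hour_list, day_str, hour_str)
def stepA (st : List (String × String) × List Char × List Char) (c : Char) :
    List (String × String) × List Char × List Char :=
  if c.isAlpha then
    if st.2.1 ≠ [] ∧ st.2.2 ≠ [] then (st.1 ++ flushRec st.2.1 st.2.2, [c], [])
    else (st.1, st.2.1 ++ [c], st.2.2)
  else if c.isDigit then (st.1, st.2.1, st.2.2 ++ [c])
  else st

def map_days_hours_to_time_slots (day_hour_str : String) : List (String × String) :=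
  let st := day_hour_str.toList.foldl stepA ([], [], [])
  if st.2.1 ≠ [] ∧ st.2.2 ≠ [] then st.1 ++ flushRec st.2.1 st.2.2 else st.1

-- ===== PORT B =====
-- phase 1: maximal runs of letters / digits, other characters dropped
def tokenizeB : List Char → List (List Char)
  | [] => []
  | c :: cs =>
    if c.isAlpha then
      (c :: cs.takeWhile (·.isAlpha)) :: tokenizeB (cs.dropWhile (·.isAlpha))
    else if c.isDigit then
      (c :: cs.takeWhile (·.isDigit)) :: tokenizeB (cs.dropWhile (·.isDigit))
    else tokenizeB cs
termination_by cs => cs.length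
decreasing_by
  · exact Nat.lt_succ_of_le (List.length_dropWhile_le _ _)
  · exact Nat.lt_succ_of_le (List.length_dropWhile_le _ _)
  · exact Nat.lt_succ_of_le (Nat.le_refl _)

-- phase 2: per-run step on state (records, day_buf, hour_buf)
def stepB (st : List (List Char × List Char) × List Char × List Char) (run : List Char) :
    List (List Char × List Char) × List Char × List Char :=
  if (run.headD ' ').isDigit then (st.1, st.2.1, st.2.2 ++ run)
  else if st.2.1 ≠ [] ∧ st.2.2 ≠ [] then (st.1 ++ [(st.2.1, st.2.2)], run, [])
  else (st.1, st.2.1 ++ run, st.2.2)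

-- phase 3: expand each record (same lookup code as A's emission)
def expandRecs (rs : List (List Char × List Char)) : List (String × String) :=
  rs.flatMap (fun r => flushRec r.1 r.2)

def map_days_hours_to_time_slots_alt (day_hour_str : String) : List (String × String) :=
  let st := (tokenizeB day_hour_str.toList).foldl stepB ([], [], [])
  let recs := if st.2.1 ≠ [] ∧ st.2.2 ≠ [] then st.1 ++ [(st.2.1, st.2.2)] else st.1
  expandRecs recs

-- ===== PRECONDITION & SPEC =====
-- the maximal letter/digit blocks of the alphanumeric characters, used only to state Pre_
def classBlocks (s : String) : List (List Char) :=
  (s.toList.filter (fun c => c.isAlpha || c.isDigit)).splitBy (fun a b => a.isAlpha == b.isAlpha)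

-- a letter block directly followed by a digit block must be a valid Mon–Fri day code,
-- and a Friday block may only carry digits 0–5 (Friday has 5 slots)
def validAdj (p : List Char × List Char) : Prop :=
  (p.1.headD ' ').isAlpha = true → (p.2.headD ' ').isDigit = true →
    (p.1 = ['M'] ∨ p.1 = ['T'] ∨ p.1 = ['W'] ∨ p.1 = ['T','h'] ∨ p.1 = ['F']) ∧
    (p.1 = ['F'] → ∀ c ∈ p.2, c.toNat ≤ 53)

-- Pre_ excludes inputs on which A raises (unknown-day KeyError, Friday IndexError) and strings
-- where a digit precedes the first letter: there the grouping of the following letter run is an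
-- unspecified corner (A pairs the hours with only the run's first letter, B with the whole run;
-- both readings are defensible, and B may raise on the resulting unknown code).
def Pre_map_days_hours_to_time_slots (day_hour_str : String) : Prop :=
  ((day_hour_str.toList.any (·.isAlpha)) = true →
    ((day_hour_str.toList.takeWhile (fun c => !c.isAlpha)).all (fun c => !c.isDigit)) = true) ∧
  ∀ p ∈ (classBlocks day_hour_str).zip (classBlocks day_hour_str).tail, validAdj p
instance (day_hour_str : String) : Decidable (Pre_map_days_hours_to_time_slots day_hour_str) := by
  unfold Pre_map_days_hours_to_time_slots validAdj; infer_instance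

def pvWitness_map_days_hours_to_time_slots : String := "M135T24"

def Spec_map_days_hours_to_time_slots (day_hour_str : String) (out : List (String × String)) : Prop := out = map_days_hours_to_time_slots_alt day_hour_str
instance (day_hour_str : String) (out : List (String × String)) : Decidable (Spec_map_days_hours_to_time_slots day_hour_str out) := by unfold Spec_map_days_hours_to_time_slots; infer_instance

-- ===== CLAIM (what is proved, stated in full; the proofs are below) =====
def Claim_equal_map_days_hours_to_time_slots : Prop := ∀ (day_hour_str : String), Dom_map_days_hours_to_time_slots day_hour_str → Pre_map_days_hours_to_time_slots day_hour_str → Spec_map_days_hours_to_time_slots day_hour_str (map_days_hours_to_time_slots day_hour_str)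

-- ===== LEMMAS AND PROOFS =====

lemma digit_not_alpha (c : Char) (h : c.isDigit = true) : c.isAlpha = false := by
  simp [Char.isDigit, UInt32.le_iff_toNat_le] at h
  simp [Char.isAlpha, Char.isUpper, Char.isLower, UInt32.le_iff_toNat_le]
  omega

lemma alpha_not_digit (c : Char) (h : c.isAlpha = true) : c.isDigit = false := by
  simp [Char.isAlpha, Char.isUpper, Char.isLower, UInt32.le_iff_toNat_le] at h
  simp [Char.isDigit, UInt32.le_iff_toNat_le]
  omega

lemma expandRecs_append (a b : List (List Char × List Char)) :
    expandRecs (a ++ b) = expandRecs a ++ expandRecs b := by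
  simp [expandRecs]

-- A's char loop over a pure digit run just appends the run to hour_str
lemma foldA_digits (t : List Char) (h : ∀ c ∈ t, c.isDigit = true) (acc : List (String × String))
    (day hour : List Char) : t.foldl stepA (acc, day, hour) = (acc, day, hour ++ t) := by
  induction t generalizing hour with
  | nil => simp
  | cons c t ih =>
    have hc : c.isDigit = true := h c (by simp)
    simp only [List.foldl_cons, stepA, digit_not_alpha c hc, hc]
    simp only [Bool.false_eq_true, if_false, if_true]
    rw [ih (fun x hx => h x (by simp [hx]))]
    simp

-- A's char loop over a pure letter run with empty hour_str just appends the run to day_str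
lemma foldA_alphas (t : List Char) (h : ∀ c ∈ t, c.isAlpha = true) (acc : List (String × String))
    (day : List Char) : t.foldl stepA (acc, day, []) = (acc, day ++ t, []) := by
  induction t generalizing day with
  | nil => simp
  | cons c t ih =>
    have hc : c.isAlpha = true := h c (by simp)
    simp only [List.foldl_cons, stepA, hc, if_true]
    have : ¬(day ≠ [] ∧ ([] : List Char) ≠ []) := by simp
    rw [if_neg this, ih (fun x hx => h x (by simp [hx]))]
    simp

-- the loop invariant's side condition: day_str is empty only while no digit has been
-- misplaced before the first letter of the remaining input (or no letter remains at all)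
def OKState (cs day hour : List Char) : Prop :=
  day = [] →
    (hour = [] ∧ ((cs.takeWhile (fun c => !c.isAlpha)).all (fun c => !c.isDigit)) = true) ∨
    (cs.all (fun c => !c.isAlpha)) = true

lemma main_fusion (n : Nat) : ∀ (cs : List Char), cs.length ≤ n →
    ∀ (recs : List (List Char × List Char)) (day hour : List Char), OKState cs day hour →
    cs.foldl stepA (expandRecs recs, day, hour) =
      (fun st => (expandRecs st.1, st.2.1, st.2.2))
        ((tokenizeB cs).foldl stepB (recs, day, hour)) := by
  induction n with
  | zero =>
    intro cs hlen recs day hour _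
    have : cs = [] := List.length_eq_zero_iff.mp (Nat.le_zero.mp hlen)
    subst this; simp [tokenizeB]
  | succ n ih =>
    intro cs hlen recs day hour hok
    match cs with
    | [] => simp [tokenizeB]
    | c :: cs' =>
      have hlen' : cs'.length ≤ n := Nat.le_of_succ_le_succ hlen
      by_cases ha : c.isAlpha
      · -- a letter run
        have hsplit := List.takeWhile_append_dropWhile (p := (·.isAlpha)) (l := cs')
        have htake : ∀ x ∈ cs'.takeWhile (·.isAlpha), x.isAlpha = true :=
          fun x hx => List.mem_takeWhile_imp hx
        have hrest : (cs'.dropWhile (·.isAlpha)).length ≤ n :=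
          le_trans (List.length_dropWhile_le _ _) hlen'
        rw [tokenizeB, if_pos ha]
        simp only [List.foldl_cons]
        conv_lhs => rw [← hsplit, List.foldl_append]
        by_cases hDH : day ≠ [] ∧ hour ≠ []
        · -- flush, the run becomes the new day buffer
          rw [show stepA (expandRecs recs, day, hour) c =
                (expandRecs recs ++ flushRec day hour, [c], []) by
              simp [stepA, ha, hDH]]
          rw [foldA_alphas _ htake]
          rw [show stepB (recs, day, hour) (c :: cs'.takeWhile (·.isAlpha)) =
                (recs ++ [(day, hour)], c :: cs'.takeWhile (·.isAlpha), []) by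
              simp [stepB, alpha_not_digit c ha, hDH]]
          rw [show expandRecs recs ++ flushRec day hour = expandRecs (recs ++ [(day, hour)]) by
              rw [expandRecs_append]; simp [expandRecs]]
          rw [List.singleton_append]
          exact ih _ hrest _ _ _ (fun h => absurd h (by simp))
        · -- no flush: hour is empty, the run is appended to the day buffer
          have hhour : hour = [] := by
            by_cases hd : day = []
            · rcases hok hd with ⟨h1, _⟩ | h2
              · exact h1
              · exact absurd (by simpa using List.all_eq_true.mp h2 c (by simp)) (by simp [ha])
            · rcases not_and_or.mp hDH with h | h
              · exact absurd hd (by simpa using h)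
              · simpa using h
          subst hhour
          rw [show stepA (expandRecs recs, day, []) c = (expandRecs recs, day ++ [c], []) by
              simp [stepA, ha]]
          rw [foldA_alphas _ htake]
          rw [show stepB (recs, day, []) (c :: cs'.takeWhile (·.isAlpha)) =
                (recs, day ++ (c :: cs'.takeWhile (·.isAlpha)), []) by
              simp [stepB, alpha_not_digit c ha]]
          rw [show (day ++ [c]) ++ cs'.takeWhile (·.isAlpha) =
                day ++ (c :: cs'.takeWhile (·.isAlpha)) by simp]
          exact ih _ hrest _ _ _ (fun h => absurd h (by simp))
      · by_cases hd : c.isDigit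
        · -- a digit run, appended to the hour buffer
          have hsplit := List.takeWhile_append_dropWhile (p := (·.isDigit)) (l := cs')
          have htake : ∀ x ∈ cs'.takeWhile (·.isDigit), x.isDigit = true :=
            fun x hx => List.mem_takeWhile_imp hx
          have hrest : (cs'.dropWhile (·.isDigit)).length ≤ n :=
            le_trans (List.length_dropWhile_le _ _) hlen'
          rw [tokenizeB, if_neg (by simp [ha]), if_pos hd]
          simp only [List.foldl_cons]
          conv_lhs => rw [← hsplit, List.foldl_append]
          rw [show stepA (expandRecs recs, day, hour) c = (expandRecs recs, day, hour ++ [c]) by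
              simp [stepA, ha, hd]]
          rw [foldA_digits _ htake]
          rw [show stepB (recs, day, hour) (c :: cs'.takeWhile (·.isDigit)) =
                (recs, day, hour ++ (c :: cs'.takeWhile (·.isDigit))) by simp [stepB, hd]]
          rw [show (hour ++ [c]) ++ cs'.takeWhile (·.isDigit) =
                hour ++ (c :: cs'.takeWhile (·.isDigit)) by simp]
          refine ih _ hrest _ _ _ ?_
          intro hday
          rcases hok hday with ⟨_, h2⟩ | h2
          · -- impossible: a digit stood before the first letter
            exfalso
            have := List.all_eq_true.mp h2 c (by simp [ha])
            simp [hd] at this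
          · right
            rw [List.all_eq_true] at h2 ⊢
            exact fun x hx => h2 x (List.mem_cons_of_mem c ((List.dropWhile_sublist (p := fun c => c.isDigit) (l := cs')).subset hx))
        · -- any other character is skipped by both sides
          rw [tokenizeB, if_neg (by simp [ha]), if_neg (by simp [hd])]
          simp only [List.foldl_cons]
          rw [show stepA (expandRecs recs, day, hour) c = (expandRecs recs, day, hour) by
              simp [stepA, ha, hd]]
          refine ih _ hlen' _ _ _ ?_
          intro hday
          rcases hok hday with ⟨h1, h2⟩ | h2
          · left
            refine ⟨h1, ?_⟩
            rw [List.takeWhile_cons, if_pos (by simp [ha])] at h2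
            simpa using (List.all_eq_true.mp h2 · ∘ List.mem_cons_of_mem c)
          · right
            simpa using fun x hx => List.all_eq_true.mp h2 x (by simp [hx])

-- ===== VERDICT (by name: the statement is the Claim_ definition above) =====
theorem map_days_hours_to_time_slots_spec : Claim_equal_map_days_hours_to_time_slots := by
  intro s _ hpre
  unfold Spec_map_days_hours_to_time_slots
  obtain ⟨h1, _⟩ := hpre
  have hok : OKState s.toList [] [] := by
    intro _
    by_cases h : s.toList.any (·.isAlpha) = true
    · exact Or.inl ⟨rfl, h1 h⟩
    · refine Or.inr ?_
      rw [List.all_eq_true]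
      intro x hx
      simpa using fun hal => h (List.any_eq_true.mpr ⟨x, hx, hal⟩)
  have hmain := main_fusion s.toList.length s.toList le_rfl [] [] [] hok
  have hexp0 : expandRecs [] = [] := rfl
  rw [hexp0] at hmain
  unfold map_days_hours_to_time_slots map_days_hours_to_time_slots_alt
  simp only [hmain]
  split_ifs with h
  · rw [expandRecs_append]
    simp [expandRecs]
  · rfl
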